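-- pv_equiv track=rewrite | github.com/SeungjipLee/Algorithm | 배준형/Week12/Prog_Lv3.불량 사용자.py | solution
-- ===== SOURCE A (Python) =====
-- def solution(user_id, banned_id):
--     answer = 0
--     n = len(user_id)
--     m = len(banned_id)
--     banned_ids = [[] for _ in range(m)]
--     # 1. 각 banned_id 에 가능한 아이디들 다 찾아두기
--     for i in range(m):
--         banned_ids[i].extend(id_check(banned_id[i], user_id))
--
--     # 2. 가능한 조합 => 비트마스킹으로 만들어서 갯수 세기
--     combs = []
--     make_comb(combs, banned_ids, 0, 0, m)
--
--     return len(set(combs))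
--
-- def id_check(b_id, user_id):
--     result = []
--     length = len(b_id)
--     for i, u_id in enumerate(user_id):
--         if len(u_id) != length:
--             continue
--         for idx, each in enumerate(b_id):
--             if each == "*":
--                 continue
--             if u_id[idx] != each:
--                 break
--         else:
--             result.append(i)
--
--     return result
--
-- def make_comb(combs, banned_ids, comb, d, m):
--     if d == m:
--         combs.append(comb)
--         return
--     ids = banned_ids[d]
--
--     for now in ids:
--         if 1<<now & comb:
--             continue
--         make_comb(combs, banned_ids, comb|1<<now, d+1, m)
-- ===== SOURCE B (Python) =====
-- def solution(user_id, banned_id):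
--     cands = [[i for i, u in enumerate(user_id) if matches(u, b)] for b in banned_id]
--     combos = [()]
--     for cl in cands:
--         combos = [t + (x,) for t in combos for x in cl if x not in t]
--     return len({frozenset(t) for t in combos})
--
-- def matches(u, b):
--     return len(u) == len(b) and all(bc == '*' or uc == bc for uc, bc in zip(u, b))
-- ===== Notes on version B (the rewrite author's own statement) =====
-- stated objective: alternative
-- what changed: Replaces the recursive DFS that threads an int bitmask and dedups masks at the end by an iterative level-by-level product of candidate index tuples (pruned by 'x not in t') deduplicated as frozensets, with zip-based wildcard matching instead of an indexed break/else loop.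
import Mathlib
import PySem

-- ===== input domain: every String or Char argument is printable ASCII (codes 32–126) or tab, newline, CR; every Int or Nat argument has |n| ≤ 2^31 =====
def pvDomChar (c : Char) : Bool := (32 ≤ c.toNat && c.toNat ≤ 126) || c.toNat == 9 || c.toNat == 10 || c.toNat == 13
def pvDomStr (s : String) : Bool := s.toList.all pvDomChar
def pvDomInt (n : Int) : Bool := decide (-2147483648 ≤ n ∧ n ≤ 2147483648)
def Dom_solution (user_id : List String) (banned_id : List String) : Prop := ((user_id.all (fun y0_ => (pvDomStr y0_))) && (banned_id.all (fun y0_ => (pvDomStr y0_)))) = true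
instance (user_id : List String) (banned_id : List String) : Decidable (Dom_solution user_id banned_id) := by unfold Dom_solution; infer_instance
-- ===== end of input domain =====

-- B replaces A's pruned DFS over an int bitmask by an iterative level-by-level product of
-- candidate tuples deduplicated as frozensets (alternative decomposition, same semantics).

-- ===== PORT A =====
-- inner 'for idx, each in enumerate(b_id): …' with break/else; walks both strings in step
-- (exact: it is only called when len(u_id) == len(b_id))
def idMatch : List Char → List Char → Bool
  | [], _ => true
  | each :: bs, us =>
    match us with
    | [] => true
    | u :: us' => if each = '*' then idMatch bs us' else if u ≠ each then false else idMatch bs us'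

-- 'for i, u_id in enumerate(user_id)' carrying the enumerate counter i (i ≥ 0, so Nat is exact)
def idCheckGo (bId : String) : List String → Nat → List Nat
  | [], _ => []
  | u :: us, i =>
    if PySem.Str.len u ≠ PySem.Str.len bId then idCheckGo bId us (i + 1)
    else if idMatch bId.toList u.toList then i :: idCheckGo bId us (i + 1)
    else idCheckGo bId us (i + 1)

-- make_comb: DFS over the remaining candidate lists, threading the bitmask comb
-- (all indices are ≥ 0, so Nat masks/shifts are exact for Python's ints here)
def makeComb : List (List Nat) → Nat → List Nat
  | [], comb => [comb]
  | ids :: rest, comb =>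
      ids.foldl (fun combs now =>
        if (1 <<< now) &&& comb ≠ 0 then combs
        else combs ++ makeComb rest (comb ||| (1 <<< now))) []

def solution (user_id : List String) (banned_id : List String) : Int :=
  let bannedIds := banned_id.map (fun b => idCheckGo b user_id 0)
  let combs := makeComb bannedIds 0
  PySem.Set.len (PySem.Set.ofList combs)

-- ===== PORT B =====
def matchesB (u b : List Char) : Bool :=
  (u.length == b.length) && (u.zip b).all (fun p => p.2 == '*' || p.1 == p.2)

-- enumerate(user_id) (counter ≥ 0, Nat exact)
def enumNat : List String → Nat → List (Nat × String)
  | [], _ => []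
  | u :: us, i => (i, u) :: enumNat us (i + 1)

def solution_alt (user_id : List String) (banned_id : List String) : Int :=
  let cands := banned_id.map (fun b =>
    ((enumNat user_id 0).filter (fun p => matchesB p.2.toList b.toList)).map (fun p => p.1))
  let combos := cands.foldl (fun acc cl =>
    acc.flatMap (fun t => (cl.filter (fun x => decide (x ∉ t))).map (fun x => t ++ [x]))) [[]]
  -- frozenset(t): canonical form = sorted list of t's (distinct) elements; exact because two
  -- frozensets of ints are equal iff the sorted lists of their elements are equal
  let seen := combos.foldl (fun s t => PySem.Set.add s (PySem.List.sorted t (fun x => x))) PySem.Set.empty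
  PySem.Set.len seen

-- ===== PRECONDITION & SPEC =====
def Spec_solution (user_id : List String) (banned_id : List String) (out : Int) : Prop := out = solution_alt user_id banned_id
instance (user_id : List String) (banned_id : List String) (out : Int) : Decidable (Spec_solution user_id banned_id out) := by unfold Spec_solution; infer_instance

-- ===== CLAIM (what is proved, stated in full; the proofs are below) =====
def Claim_equal_solution : Prop := ∀ (user_id : List String) (banned_id : List String), Dom_solution user_id banned_id → Spec_solution user_id banned_id (solution user_id banned_id)

-- ===== LEMMAS AND PROOFS =====

-- the plain (unpruned) lexicographic product of the candidate lists
def prodR : List (List Nat) → List (List Nat)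
  | [] => [[]]
  | l :: ls => l.flatMap (fun x => (prodR ls).map (fun t => x :: t))

-- A's pruning chain, phrased on a tuple against a running mask
def okFrom (comb : Nat) : List Nat → Bool
  | [] => true
  | x :: t => if (1 <<< x) &&& comb ≠ 0 then false else okFrom (comb ||| (1 <<< x)) t

-- B's pruning chain, phrased on a tuple against the prefix built so far
def okMem (t : List Nat) : List Nat → Bool
  | [] => true
  | x :: r => if x ∈ t then false else okMem (t ++ [x]) r

def endMask (comb : Nat) (t : List Nat) : Nat := t.foldl (fun c x => c ||| (1 <<< x)) comb


lemma idMatch_eq_zipAll (bs us : List Char) :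
    idMatch bs us = (us.zip bs).all (fun p => p.2 == '*' || p.1 == p.2) := by
  induction bs generalizing us with
  | nil => cases us <;> simp [idMatch]
  | cons each bs ih =>
    cases us with
    | nil => simp [idMatch]
    | cons u us' =>
      by_cases h : each = '*'
      · simp [idMatch, h, ih]
      · by_cases h2 : u = each <;> simp [idMatch, h, h2, ih]

lemma idCheckGo_eq (bId : String) (us : List String) (i : Nat) :
    idCheckGo bId us i = ((enumNat us i).filter (fun p => matchesB p.2.toList bId.toList)).map (fun p => p.1) := by
  induction us generalizing i with
  | nil => simp [idCheckGo, enumNat]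
  | cons u us ih =>
    simp only [idCheckGo, enumNat, List.filter_cons]
    by_cases hl : u.toList.length = bId.toList.length
    · have hlen : ¬(PySem.Str.len u ≠ PySem.Str.len bId) := by
        simp [PySem.Str.len_eq, hl]
      rw [if_neg hlen]
      have hmz := idMatch_eq_zipAll bId.toList u.toList
      by_cases hm : idMatch bId.toList u.toList = true
      · have hB : matchesB u.toList bId.toList = true := by
          simp only [matchesB, Bool.and_eq_true, beq_iff_eq]
          exact ⟨hl, by rw [← hmz]; exact hm⟩
        simp [hm, hB, ih]
      · have hB : ¬(matchesB u.toList bId.toList = true) := by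
          simp only [matchesB, Bool.and_eq_true, beq_iff_eq]
          rintro ⟨-, hz⟩; exact hm (by rw [hmz]; exact hz)
        simp [hm, hB, ih]
    · have hlen : (PySem.Str.len u ≠ PySem.Str.len bId) := by
        simp only [PySem.Str.len_eq, ne_eq, Nat.cast_inj]
        exact hl
      rw [if_pos hlen]
      have hB : ¬(matchesB u.toList bId.toList = true) := by
        simp only [matchesB, Bool.and_eq_true, beq_iff_eq]
        rintro ⟨h1, -⟩; exact hl h1
      simp [hB, ih]

lemma filtermap_flatMap {α β γ : Type} (l : List α) (F : α → List β) (p : β → Bool) (g : β → γ) :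
    ((l.flatMap F).filter p).map g = l.flatMap (fun x => ((F x).filter p).map g) := by
  induction l with
  | nil => simp
  | cons a l ih => simp [List.flatMap_cons, List.filter_append, List.map_append, ih]

lemma flatMap_filter {α β : Type} (l : List α) (p : α → Bool) (F : α → List β) :
    (l.filter p).flatMap F = l.flatMap (fun x => if p x then F x else []) := by
  induction l with
  | nil => simp
  | cons a l ih => by_cases h : p a <;> simp [h, ih]

lemma flatMap_flatMap' {α β γ : Type} (l : List α) (F : α → List β) (G : β → List γ) :
    (l.flatMap F).flatMap G = l.flatMap (fun x => (F x).flatMap G) := by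
  induction l with
  | nil => simp
  | cons a l ih => simp [List.flatMap_cons, List.flatMap_append, ih]

lemma testBit_iff (comb x : Nat) : ((1 <<< x) &&& comb ≠ 0) ↔ comb.testBit x := by
  rw [Nat.one_shiftLeft, Nat.and_comm, Nat.and_two_pow]
  cases h' : comb.testBit x <;> simp [Nat.pow_eq_zero]

lemma mc_char (L : List (List Nat)) : ∀ (comb : Nat),
    makeComb L comb = ((prodR L).filter (okFrom comb)).map (endMask comb) := by
  induction L with
  | nil => intro comb; simp [makeComb, prodR, okFrom, endMask]
  | cons ids rest ih =>
    intro comb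
    have hstep : (fun (combs : List Nat) now =>
        if (1 <<< now) &&& comb ≠ 0 then combs
        else combs ++ makeComb rest (comb ||| (1 <<< now)))
      = (fun combs now => combs ++ (if (1 <<< now) &&& comb ≠ 0 then [] else makeComb rest (comb ||| (1 <<< now)))) := by
      funext combs now; split_ifs <;> simp
    rw [makeComb, hstep, PySem.List.foldl_append_eq_flatMap]
    rw [show prodR (ids :: rest) = ids.flatMap (fun x => (prodR rest).map (fun t => x :: t)) from rfl]
    rw [filtermap_flatMap]
    simp only [List.nil_append]
    refine congrArg (fun F => List.flatMap F ids) (funext fun x => ?_)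
    rw [List.filter_map, List.map_map]
    have hok : (okFrom comb ∘ fun t => x :: t)
        = fun t => if (1 <<< x) &&& comb ≠ 0 then false else okFrom (comb ||| (1 <<< x)) t := by
      funext t; simp [Function.comp, okFrom]
    by_cases hx : (1 <<< x) &&& comb ≠ 0
    · simp [hok, hx]
    · have hcomp : (endMask comb ∘ fun t => x :: t) = endMask (comb ||| (1 <<< x)) := by
        funext t; rfl
      simp [hok, hx, ih, hcomp]

lemma prodB (L : List (List Nat)) : ∀ (acc : List (List Nat)),
    L.foldl (fun acc cl =>
      acc.flatMap (fun t => (cl.filter (fun x => decide (x ∉ t))).map (fun x => t ++ [x]))) acc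
    = acc.flatMap (fun t => ((prodR L).filter (okMem t)).map (fun r => t ++ r)) := by
  induction L with
  | nil => intro acc; simp [prodR, okMem]
  | cons cl L ih =>
    intro acc
    rw [List.foldl_cons, ih]
    rw [flatMap_flatMap']
    refine congrArg (fun F => List.flatMap F acc) (funext fun t => ?_)
    rw [List.flatMap_map, flatMap_filter]
    rw [show prodR (cl :: L) = cl.flatMap (fun x => (prodR L).map (fun r => x :: r)) from rfl,
       filtermap_flatMap]
    refine congrArg (fun F => List.flatMap F cl) (funext fun x => ?_)
    rw [List.filter_map, List.map_map]
    have hok : (okMem t ∘ fun r => x :: r)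
        = fun r => if x ∈ t then false else okMem (t ++ [x]) r := by
      funext r; simp [Function.comp, okMem]
    by_cases hx : x ∈ t
    · simp [hok, hx]
    · have hcomp : ((fun r => t ++ r) ∘ fun r => x :: r) = fun r => (t ++ [x]) ++ r := by
        funext r; show t ++ (x :: r) = (t ++ [x]) ++ r; simp
      simp [hok, hx, hcomp]

lemma okFrom_iff (t : List Nat) : ∀ (comb : Nat),
    okFrom comb t = true ↔ t.Nodup ∧ ∀ x ∈ t, comb.testBit x = false := by
  induction t with
  | nil => intro comb; simp [okFrom]
  | cons x t ih =>
    intro comb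
    by_cases hb : comb.testBit x = true
    · have hx : (1 <<< x) &&& comb ≠ 0 := (testBit_iff comb x).2 hb
      simp only [okFrom, if_pos hx]
      constructor
      · intro h; cases h
      · rintro ⟨-, h2⟩
        have := h2 x (List.mem_cons_self)
        rw [hb] at this; cases this
    · have hx : ¬((1 <<< x) &&& comb ≠ 0) := fun hc => hb ((testBit_iff comb x).1 hc)
      simp only [okFrom, if_neg hx, ih]
      have hbt : ∀ y, (comb ||| (1 <<< x)).testBit y = false ↔ (comb.testBit y = false ∧ y ≠ x) := by
        intro y
        rw [Nat.one_shiftLeft, Nat.testBit_lor, Nat.testBit_two_pow]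
        simp only [Bool.or_eq_false_iff, decide_eq_false_iff_not]
        exact and_congr_right fun _ => ne_comm
      constructor
      · rintro ⟨hnd, hall⟩
        refine ⟨List.nodup_cons.2 ⟨?_, hnd⟩, ?_⟩
        · intro hxin; exact ((hbt x).1 (hall x hxin)).2 rfl
        · intro y hy
          rcases List.mem_cons.1 hy with rfl | hy'
          · exact Bool.eq_false_iff.2 hb
          · exact ((hbt y).1 (hall y hy')).1
      · rintro ⟨hnd, hall⟩
        have hnd' := List.nodup_cons.1 hnd
        refine ⟨hnd'.2, fun y hy => (hbt y).2 ⟨hall y (List.mem_cons_of_mem _ hy), ?_⟩⟩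
        rintro rfl; exact hnd'.1 hy

lemma okMem_iff (r : List Nat) : ∀ (t : List Nat),
    okMem t r = true ↔ r.Nodup ∧ ∀ x ∈ r, x ∉ t := by
  induction r with
  | nil => intro t; simp [okMem]
  | cons x r ih =>
    intro t
    by_cases hx : x ∈ t
    · simp only [okMem, if_pos hx]
      constructor
      · intro h; cases h
      · rintro ⟨-, h2⟩; exact absurd hx (h2 x (List.mem_cons_self))
    · simp only [okMem, if_neg hx, ih]
      constructor
      · rintro ⟨hnd, hall⟩
        refine ⟨List.nodup_cons.2 ⟨fun hxin => (hall x hxin) (by simp), hnd⟩, ?_⟩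
        intro y hy
        rcases List.mem_cons.1 hy with rfl | hy'
        · exact hx
        · intro hyt; exact hall y hy' (List.mem_append_left _ hyt)
      · rintro ⟨hnd, hall⟩
        have hnd' := List.nodup_cons.1 hnd
        refine ⟨hnd'.2, fun y hy hyt => ?_⟩
        rcases List.mem_append.1 hyt with h1 | h2
        · exact hall y (List.mem_cons_of_mem _ hy) h1
        · have hyx : y = x := by simpa using h2
          exact hnd'.1 (hyx ▸ hy)

lemma testBit_endMask (t : List Nat) : ∀ (comb j : Nat),
    (endMask comb t).testBit j = (comb.testBit j || decide (j ∈ t)) := by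
  induction t with
  | nil => intro comb j; simp [endMask]
  | cons x t ih =>
    intro comb j
    rw [show endMask comb (x :: t) = endMask (comb ||| (1 <<< x)) t from rfl, ih,
      Nat.one_shiftLeft, Nat.testBit_lor, Nat.testBit_two_pow]
    have h1 : decide (x = j) = decide (j = x) := by
      by_cases h2 : x = j
      · simp [h2]
      · simp [h2, Ne.symm h2]
    have h3 : decide (j ∈ x :: t) = (decide (j = x) || decide (j ∈ t)) := by
      by_cases h4 : j = x <;> by_cases h5 : j ∈ t <;> simp [h4, h5]
    rw [h1, h3, Bool.or_assoc]

lemma endMask0_eq_iff (t t' : List Nat) :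
    endMask 0 t = endMask 0 t' ↔ (∀ j, j ∈ t ↔ j ∈ t') := by
  constructor
  · intro h j
    have h1 := congrArg (fun n => n.testBit j) h
    simp only [testBit_endMask, Nat.zero_testBit, Bool.false_or] at h1
    simpa using h1
  · intro h
    apply Nat.eq_of_testBit_eq
    intro j
    simp [testBit_endMask, Nat.zero_testBit, h j]

lemma canon_eq_iff (t t' : List Nat) (h : t.Nodup) (h' : t'.Nodup) :
    PySem.List.sorted t (fun x => x) = PySem.List.sorted t' (fun x => x) ↔ (∀ j, j ∈ t ↔ j ∈ t') := by
  rw [PySem.List.sorted_id_eq_sorted_id_iff_perm, List.perm_ext_iff_of_nodup h h']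

lemma set_len_add {β : Type} [BEq β] [LawfulBEq β] (s : PySem.Set β) (x : β) :
    (PySem.Set.add s x).length = if x ∈ s then s.length else s.length + 1 := by
  by_cases hx : x ∈ s
  · rw [if_pos hx]
    have : PySem.Set.add s x = s := by
      simp [PySem.Set.add, PySem.Set.contains, List.contains_eq_mem, hx]
    rw [this]
  · rw [if_neg hx]
    have : PySem.Set.add s x = s ++ [x] := by
      simp [PySem.Set.add, PySem.Set.contains, List.contains_eq_mem, hx]
    rw [this]; simp

lemma count_map_equiv {α β γ : Type} [BEq β] [LawfulBEq β] [BEq γ] [LawfulBEq γ]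
    (f : α → β) (g : α → γ) (l : List α)
    (h : ∀ a ∈ l, ∀ b ∈ l, (f a = f b ↔ g a = g b)) :
    (PySem.Set.ofList (l.map f)).length = (PySem.Set.ofList (l.map g)).length := by
  induction l using List.reverseRecOn with
  | nil => simp
  | append_singleton l a ih =>
    have hl : ∀ x ∈ l, ∀ y ∈ l, (f x = f y ↔ g x = g y) := fun x hx y hy =>
      h x (List.mem_append_left _ hx) y (List.mem_append_left _ hy)
    have ha : a ∈ l ++ [a] := List.mem_append_right _ (by simp)
    have hmem : (f a ∈ l.map f) ↔ (g a ∈ l.map g) := by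
      simp only [List.mem_map]
      constructor
      · rintro ⟨x, hx, hfx⟩
        exact ⟨x, hx, (h x (List.mem_append_left _ hx) a ha).1 hfx⟩
      · rintro ⟨x, hx, hgx⟩
        exact ⟨x, hx, (h x (List.mem_append_left _ hx) a ha).2 hgx⟩
    rw [List.map_append, List.map_append, List.map_singleton, List.map_singleton,
      PySem.Set.ofList_append_singleton, PySem.Set.ofList_append_singleton,
      set_len_add, set_len_add]
    by_cases hfa : f a ∈ l.map f
    · rw [if_pos (by rw [PySem.Set.mem_ofList]; exact hfa),
        if_pos (by rw [PySem.Set.mem_ofList]; exact hmem.1 hfa), ih hl]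
    · rw [if_neg (by rw [PySem.Set.mem_ofList]; exact hfa),
        if_neg (by rw [PySem.Set.mem_ofList]; exact fun hc => hfa (hmem.2 hc)), ih hl]

-- ===== VERDICT (by name: the statement is the Claim_ definition above) =====
theorem solution_spec : Claim_equal_solution := by
  intro user banned _
  simp only [Spec_solution, solution, solution_alt]
  have hc : (fun b => idCheckGo b user 0)
      = (fun b : String => ((enumNat user 0).filter (fun p => matchesB p.2.toList b.toList)).map (fun p => p.1)) :=
    funext fun b => idCheckGo_eq b user 0
  rw [hc]
  set L := banned.map (fun b : String =>
    ((enumNat user 0).filter (fun p => matchesB p.2.toList b.toList)).map (fun p => p.1)) with hLdef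
  rw [prodB]
  simp only [List.flatMap_cons, List.flatMap_nil, List.append_nil, List.nil_append, List.map_id']
  have hseen : ∀ (combos : List (List Nat)),
      combos.foldl (fun s t => PySem.Set.add s (PySem.List.sorted t (fun x => x))) PySem.Set.empty
      = PySem.Set.ofList (combos.map (fun t => PySem.List.sorted t (fun x => x))) := by
    intro combos
    rw [PySem.Set.ofList_eq_foldl, List.foldl_map]
    rfl
  rw [hseen, mc_char]
  have hofA : List.filter (okFrom 0) (prodR L) = List.filter (fun t => decide t.Nodup) (prodR L) :=
    List.filter_congr (fun t _ => by
      rw [Bool.eq_iff_iff, okFrom_iff]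
      simp [Nat.zero_testBit])
  have hofB : List.filter (okMem []) (prodR L) = List.filter (fun t => decide t.Nodup) (prodR L) :=
    List.filter_congr (fun t _ => by
      rw [Bool.eq_iff_iff, okMem_iff]
      simp)
  rw [hofA, hofB]
  have h : ∀ a ∈ List.filter (fun t => decide t.Nodup) (prodR L),
      ∀ b ∈ List.filter (fun t => decide t.Nodup) (prodR L),
      (endMask 0 a = endMask 0 b ↔
        (PySem.List.sorted a (fun x => x) = PySem.List.sorted b (fun x => x))) := by
    intro a ha b hb
    have hna : a.Nodup := by simpa using (List.mem_filter.1 ha).2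
    have hnb : b.Nodup := by simpa using (List.mem_filter.1 hb).2
    rw [endMask0_eq_iff, canon_eq_iff a b hna hnb]
  have hcount := count_map_equiv (endMask 0) (fun t => PySem.List.sorted t (fun x => x))
    (List.filter (fun t => decide t.Nodup) (prodR L)) h
  simp [PySem.Set.len, hcount]
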